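-- pv_equiv track=rewrite | github.com/geodimitrov/Random | CodeWars/Python/6 kyu/rectangle_into_squares.py | sq_in_rect
-- ===== SOURCE A (Python) =====
-- def sq_in_rect(l, w):
--     min_side, max_side = sorted((l, w))
--     result = []
--
--     while min_side != max_side and min_side > 0:
--         sides_diff = max_side // min_side
--         result += [min_side] * sides_diff
--         max_side, min_side = min_side, max_side % min_side,
--
--     return result or None
-- ===== SOURCE B (Python) =====
-- def sq_in_rect(l, w):
--     if l == w:
--         return None
--     a, b = l, w
--     result = []
--     while a > 0 and b > 0:
--         if a <= b:
--             result.append(a)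
--             b -= a
--         else:
--             result.append(b)
--             a -= b
--     return result or None
-- ===== Notes on version B (the rewrite author's own statement) =====
-- stated objective: alternative
-- what changed: Replaces A's sort-then-Euclidean-division loop (bulk list multiplication per quotient) with a guard for the square case plus a repeated-subtraction loop that emits one square per iteration, never using // or %.
import Mathlib
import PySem

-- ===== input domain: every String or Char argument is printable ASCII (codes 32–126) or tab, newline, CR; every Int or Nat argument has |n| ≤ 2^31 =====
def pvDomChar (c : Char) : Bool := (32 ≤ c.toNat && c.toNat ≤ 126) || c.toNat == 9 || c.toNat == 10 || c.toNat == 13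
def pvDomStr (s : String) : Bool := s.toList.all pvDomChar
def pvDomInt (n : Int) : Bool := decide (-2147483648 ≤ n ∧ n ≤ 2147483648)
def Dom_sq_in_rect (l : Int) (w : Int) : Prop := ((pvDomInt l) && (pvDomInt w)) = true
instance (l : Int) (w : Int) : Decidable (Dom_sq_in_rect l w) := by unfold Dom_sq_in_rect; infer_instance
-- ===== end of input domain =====

-- B replaces A's Euclidean-division loop by one-square-at-a-time repeated subtraction (alternative decomposition, not faster).

-- ===== PORT A =====
-- A's while loop (fuel makes the recursion structural; minS.toNat + 1 steps always suffice):
-- appends [min_side]*(max_side//min_side), then (max_side, min_side) := (min_side, max_side % min_side)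
def sqLoopA (fuel : Nat) (minS maxS : Int) (result : List Int) : List Int :=
  match fuel with
  | 0 => result
  | fuel + 1 =>
    if minS ≠ maxS ∧ minS > 0 then
      sqLoopA fuel (PySem.Int.mod maxS minS) minS
        (result ++ List.replicate (PySem.Int.floordiv maxS minS).toNat minS)
    else result

def sq_in_rect (l : Int) (w : Int) : Option (List Int) :=
  -- sorted((l, w)) on a pair: the smaller then the larger
  let minS := if l ≤ w then l else w
  let maxS := if l ≤ w then w else l
  let result := sqLoopA (minS.toNat + 1) minS maxS []
  if result = [] then none else some result   -- `result or None`

-- ===== PORT B =====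
-- B's while loop (fuel makes the recursion structural; (a+b).toNat + 1 steps always suffice):
-- append the smaller side, subtract it from the larger
def sqLoopB (fuel : Nat) (a b : Int) (result : List Int) : List Int :=
  match fuel with
  | 0 => result
  | fuel + 1 =>
    if a > 0 ∧ b > 0 then
      if a ≤ b then sqLoopB fuel a (b - a) (result ++ [a])
      else sqLoopB fuel (a - b) b (result ++ [b])
    else result

def sq_in_rect_alt (l : Int) (w : Int) : Option (List Int) :=
  if l = w then none
  else
    let result := sqLoopB ((l + w).toNat + 1) l w []
    if result = [] then none else some result

-- ===== PRECONDITION & SPEC =====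
def Spec_sq_in_rect (l : Int) (w : Int) (out : Option (List Int)) : Prop := out = sq_in_rect_alt l w
instance (l : Int) (w : Int) (out : Option (List Int)) : Decidable (Spec_sq_in_rect l w out) := by unfold Spec_sq_in_rect; infer_instance

-- ===== CLAIM (what is proved, stated in full; the proofs are below) =====
def Claim_equal_sq_in_rect : Prop := ∀ (l : Int) (w : Int), Dom_sq_in_rect l w → Spec_sq_in_rect l w (sq_in_rect l w)

-- ===== LEMMAS AND PROOFS =====

-- fuel-free (well-founded) versions of the two loops, used only inside the proofs
def sqLoopAW (minS maxS : Int) (result : List Int) : List Int :=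
  if h : minS ≠ maxS ∧ minS > 0 then
    sqLoopAW (PySem.Int.mod maxS minS) minS
      (result ++ List.replicate (PySem.Int.floordiv maxS minS).toNat minS)
  else result
termination_by minS.toNat
decreasing_by
  have h1 := PySem.Int.mod_nonneg maxS h.2
  have h2 := PySem.Int.mod_lt maxS h.2
  omega

def sqLoopBW (a b : Int) (result : List Int) : List Int :=
  if h : a > 0 ∧ b > 0 then
    if a ≤ b then sqLoopBW a (b - a) (result ++ [a])
    else sqLoopBW (a - b) b (result ++ [b])
  else result
termination_by (a + b).toNat
decreasing_by
  · omega
  · omega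

-- enough fuel: the fueled loops agree with the fuel-free ones
theorem sqLoopA_fuel (fuel : Nat) (minS maxS : Int) (acc : List Int)
    (hf : minS.toNat < fuel) : sqLoopA fuel minS maxS acc = sqLoopAW minS maxS acc := by
  induction fuel generalizing minS maxS acc with
  | zero => omega
  | succ fuel ih =>
    by_cases hg : minS ≠ maxS ∧ minS > 0
    · have h1 := PySem.Int.mod_nonneg maxS hg.2
      have h2 := PySem.Int.mod_lt maxS hg.2
      conv_rhs => rw [sqLoopAW]
      rw [sqLoopA, if_pos hg, dif_pos hg, ih _ _ _ (by omega)]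
    · conv_rhs => rw [sqLoopAW]
      rw [sqLoopA, if_neg hg, dif_neg hg]

theorem sqLoopB_fuel (fuel : Nat) (a b : Int) (acc : List Int)
    (hf : (a + b).toNat < fuel) : sqLoopB fuel a b acc = sqLoopBW a b acc := by
  induction fuel generalizing a b acc with
  | zero => omega
  | succ fuel ih =>
    by_cases hg : a > 0 ∧ b > 0
    · conv_rhs => rw [sqLoopBW]
      rw [sqLoopB, if_pos hg, dif_pos hg]
      by_cases hab : a ≤ b
      · rw [if_pos hab, if_pos hab, ih _ _ _ (by omega)]
      · rw [if_neg hab, if_neg hab, ih _ _ _ (by omega)]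
    · conv_rhs => rw [sqLoopBW]
      rw [sqLoopB, if_neg hg, dif_neg hg]


-- one-step unfolding lemmas for the two loops
theorem sqLoopAW_stop (minS maxS : Int) (acc : List Int) (hg : ¬ (minS ≠ maxS ∧ minS > 0)) :
    sqLoopAW minS maxS acc = acc := by
  conv_lhs => rw [sqLoopAW]
  rw [dif_neg hg]

theorem sqLoopAW_step (minS maxS : Int) (acc : List Int) (hg : minS ≠ maxS ∧ minS > 0) :
    sqLoopAW minS maxS acc = sqLoopAW (PySem.Int.mod maxS minS) minS
      (acc ++ List.replicate (PySem.Int.floordiv maxS minS).toNat minS) := by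
  conv_lhs => rw [sqLoopAW]
  rw [dif_pos hg]

theorem sqLoopBW_stop (a b : Int) (acc : List Int) (hg : ¬ (a > 0 ∧ b > 0)) :
    sqLoopBW a b acc = acc := by
  conv_lhs => rw [sqLoopBW]
  rw [dif_neg hg]

theorem sqLoopBW_step_le (a b : Int) (acc : List Int) (hg : a > 0 ∧ b > 0) (hab : a ≤ b) :
    sqLoopBW a b acc = sqLoopBW a (b - a) (acc ++ [a]) := by
  conv_lhs => rw [sqLoopBW]
  rw [dif_pos hg, if_pos hab]

theorem sqLoopBW_step_gt (a b : Int) (acc : List Int) (hg : a > 0 ∧ b > 0) (hab : ¬ a ≤ b) :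
    sqLoopBW a b acc = sqLoopBW (a - b) b (acc ++ [b]) := by
  conv_lhs => rw [sqLoopBW]
  rw [dif_pos hg, if_neg hab]

-- both loops are accumulator-passing: factor the accumulator out
theorem sqLoopAW_acc (minS maxS : Int) (acc : List Int) :
    sqLoopAW minS maxS acc = acc ++ sqLoopAW minS maxS [] := by
  have H : ∀ n : Nat, ∀ minS maxS : Int, minS.toNat ≤ n → ∀ acc : List Int,
      sqLoopAW minS maxS acc = acc ++ sqLoopAW minS maxS [] := by
    intro n
    induction n with
    | zero =>
      intro minS maxS hn acc
      have hg : ¬ (minS ≠ maxS ∧ minS > 0) := by omega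
      rw [sqLoopAW_stop _ _ _ hg, sqLoopAW_stop _ _ _ hg, List.append_nil]
    | succ n ih =>
      intro minS maxS hn acc
      by_cases hg : minS ≠ maxS ∧ minS > 0
      · have hm1 := PySem.Int.mod_nonneg maxS hg.2
        have hm2 := PySem.Int.mod_lt maxS hg.2
        rw [sqLoopAW_step _ _ _ hg, sqLoopAW_step _ _ [] hg,
          ih _ _ (by omega), ih _ _ (by omega) ([] ++ _)]
        simp [List.append_assoc]
      · rw [sqLoopAW_stop _ _ _ hg, sqLoopAW_stop _ _ _ hg, List.append_nil]
  exact H minS.toNat minS maxS le_rfl acc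

theorem sqLoopBW_acc (a b : Int) (acc : List Int) :
    sqLoopBW a b acc = acc ++ sqLoopBW a b [] := by
  have H : ∀ n : Nat, ∀ a b : Int, (a + b).toNat ≤ n → ∀ acc : List Int,
      sqLoopBW a b acc = acc ++ sqLoopBW a b [] := by
    intro n
    induction n with
    | zero =>
      intro a b hn acc
      by_cases hg : a > 0 ∧ b > 0
      · omega
      · rw [sqLoopBW_stop _ _ _ hg, sqLoopBW_stop _ _ _ hg, List.append_nil]
    | succ n ih =>
      intro a b hn acc
      by_cases hg : a > 0 ∧ b > 0
      · by_cases hab : a ≤ b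
        · rw [sqLoopBW_step_le _ _ _ hg hab, sqLoopBW_step_le _ _ [] hg hab,
            ih _ _ (by omega), ih _ _ (by omega) ([] ++ _)]
          simp [List.append_assoc]
        · rw [sqLoopBW_step_gt _ _ _ hg hab, sqLoopBW_step_gt _ _ [] hg hab,
            ih _ _ (by omega), ih _ _ (by omega) ([] ++ _)]
          simp [List.append_assoc]
      · rw [sqLoopBW_stop _ _ _ hg, sqLoopBW_stop _ _ _ hg, List.append_nil]
  exact H (a + b).toNat a b le_rfl acc

-- B's loop is symmetric in its two sides
theorem sqLoopBW_comm (a b : Int) : sqLoopBW a b [] = sqLoopBW b a [] := by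
  have H : ∀ n : Nat, ∀ a b : Int, (a + b).toNat ≤ n →
      sqLoopBW a b [] = sqLoopBW b a [] := by
    intro n
    induction n with
    | zero =>
      intro a b hn
      by_cases hg : a > 0 ∧ b > 0
      · omega
      · rw [sqLoopBW_stop _ _ _ hg, sqLoopBW_stop _ _ _ (by omega)]
    | succ n ih =>
      intro a b hn
      by_cases hg : a > 0 ∧ b > 0
      · have hg' : b > 0 ∧ a > 0 := ⟨hg.2, hg.1⟩
        rcases lt_trichotomy a b with hab | hab | hab
        · rw [sqLoopBW_step_le _ _ _ hg (le_of_lt hab),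
            sqLoopBW_step_gt _ _ _ hg' (not_le.mpr hab),
            sqLoopBW_acc a (b - a), sqLoopBW_acc (b - a) a, ih _ _ (by omega)]
        · subst hab
          rw [sqLoopBW_step_le _ _ _ hg le_rfl]
        · rw [sqLoopBW_step_gt _ _ _ hg (not_le.mpr hab),
            sqLoopBW_step_le _ _ _ hg' (le_of_lt hab),
            sqLoopBW_acc (a - b) b, sqLoopBW_acc b (a - b), ih _ _ (by omega)]
      · rw [sqLoopBW_stop _ _ _ hg, sqLoopBW_stop _ _ _ (by omega)]
  exact H (a + b).toNat a b le_rfl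

-- one division step of A = (maxS // minS) subtraction steps of B
theorem sqLoopBW_div_step (minS maxS : Int) (hpos : 0 < minS) (hle : 0 ≤ maxS) :
    sqLoopBW minS maxS [] =
      List.replicate (PySem.Int.floordiv maxS minS).toNat minS ++
        sqLoopBW minS (PySem.Int.mod maxS minS) [] := by
  have H : ∀ n : Nat, ∀ maxS : Int, maxS.toNat ≤ n → 0 ≤ maxS →
      sqLoopBW minS maxS [] =
        List.replicate (PySem.Int.floordiv maxS minS).toNat minS ++
          sqLoopBW minS (PySem.Int.mod maxS minS) [] := by
    intro n
    induction n with
    | zero =>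
      intro maxS hn h0
      have hmx : maxS = 0 := by omega
      subst hmx
      rw [PySem.Int.floordiv_eq_ediv_of_pos hpos, PySem.Int.mod_eq_emod_of_pos hpos,
        Int.zero_ediv, Int.zero_emod]
      simp
    | succ n ih =>
      intro maxS hn h0
      rw [PySem.Int.floordiv_eq_ediv_of_pos hpos, PySem.Int.mod_eq_emod_of_pos hpos]
      by_cases hbig : minS ≤ maxS
      · have hfd : maxS / minS = (maxS - minS) / minS + 1 := by
          have h1 := Int.add_mul_ediv_right (maxS - minS) 1 (show minS ≠ 0 by omega)
          have h2 : maxS - minS + 1 * minS = maxS := by ring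
          rw [h2] at h1
          linarith
        have hmd : maxS % minS = (maxS - minS) % minS := by
          have e1 := Int.mul_ediv_add_emod maxS minS
          have e2 := Int.mul_ediv_add_emod (maxS - minS) minS
          rw [hfd, mul_add, mul_one] at e1
          linarith
        have hq0 : 0 ≤ (maxS - minS) / minS := Int.ediv_nonneg (by omega) (by omega)
        have hstep : sqLoopBW minS maxS [] = minS :: sqLoopBW minS (maxS - minS) [] := by
          rw [sqLoopBW_step_le _ _ _ ⟨hpos, by omega⟩ hbig, sqLoopBW_acc minS (maxS - minS)]
          simp
        have hih := ih (maxS - minS) (by omega) (by omega)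
        rw [PySem.Int.floordiv_eq_ediv_of_pos hpos, PySem.Int.mod_eq_emod_of_pos hpos] at hih
        rw [hstep, hih, hfd, hmd]
        have hT : ((maxS - minS) / minS + 1).toNat = ((maxS - minS) / minS).toNat + 1 := by omega
        rw [hT, List.replicate_succ]
        simp
      · have hfd : maxS / minS = 0 := Int.ediv_eq_zero_of_lt h0 (by omega)
        have hmd : maxS % minS = maxS := Int.emod_eq_of_lt h0 (by omega)
        rw [hfd, hmd]
        simp
  exact H maxS.toNat maxS le_rfl hle

-- main loop equivalence, on A's sorted entry states
theorem sqLoopW_eq (minS maxS : Int) (h0 : 0 ≤ minS) (hlt : minS < maxS) :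
    sqLoopBW minS maxS [] = sqLoopAW minS maxS [] := by
  have H : ∀ n : Nat, ∀ minS maxS : Int, minS.toNat ≤ n → 0 ≤ minS → minS < maxS →
      sqLoopBW minS maxS [] = sqLoopAW minS maxS [] := by
    intro n
    induction n with
    | zero =>
      intro minS maxS hn h0 hlt
      rw [sqLoopBW_stop _ _ _ (by omega), sqLoopAW_stop _ _ _ (by omega)]
    | succ n ih =>
      intro minS maxS hn h0 hlt
      rcases eq_or_lt_of_le h0 with hm | hm
      · rw [sqLoopBW_stop _ _ _ (by omega), sqLoopAW_stop _ _ _ (by omega)]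
      · have hr0 := PySem.Int.mod_nonneg maxS hm
        have hr1 := PySem.Int.mod_lt maxS hm
        rw [sqLoopBW_div_step minS maxS hm (by omega),
          sqLoopBW_comm minS (PySem.Int.mod maxS minS),
          ih _ _ (by omega) hr0 hr1,
          sqLoopAW_step _ _ _ ⟨by omega, hm⟩,
          sqLoopAW_acc (PySem.Int.mod maxS minS) minS
            ([] ++ List.replicate (PySem.Int.floordiv maxS minS).toNat minS)]
        simp

  exact H minS.toNat minS maxS le_rfl h0 hlt

-- ===== VERDICT (by name: the statement is the Claim_ definition above) =====
theorem sq_in_rect_spec : Claim_equal_sq_in_rect := by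
  intro l w _
  unfold Spec_sq_in_rect sq_in_rect sq_in_rect_alt
  by_cases hlw : l = w
  · subst hlw
    rw [if_pos rfl]
    simp only [le_refl, if_true]
    rw [sqLoopA_fuel _ _ _ _ (by omega), sqLoopAW_stop _ _ _ (by omega)]
    simp
  · rw [if_neg hlw]
    have key : sqLoopA ((if l ≤ w then l else w).toNat + 1) (if l ≤ w then l else w)
        (if l ≤ w then w else l) [] = sqLoopB ((l + w).toNat + 1) l w [] := by
      rw [sqLoopA_fuel _ _ _ _ (by omega), sqLoopB_fuel _ _ _ _ (by omega)]
      by_cases hle : l ≤ w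
      · simp only [if_pos hle]
        by_cases h0 : 0 ≤ l
        · exact (sqLoopW_eq l w h0 (lt_of_le_of_ne hle hlw)).symm
        · rw [sqLoopAW_stop _ _ _ (by omega), sqLoopBW_stop _ _ _ (by omega)]
      · simp only [if_neg hle]
        rw [sqLoopBW_comm l w]
        by_cases h0 : 0 ≤ w
        · exact (sqLoopW_eq w l h0 (by omega)).symm
        · rw [sqLoopAW_stop _ _ _ (by omega), sqLoopBW_stop _ _ _ (by omega)]
    simp only [key]
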